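-- pv_equiv track=rewrite | github.com/Eargosha/TLSViewer | app/core/log_parser.py | split_tls_records
-- ===== SOURCE A (Python) =====
-- def split_tls_records(lines):
--     """
--     Разделение строк на отдельные TLS-записи,
--     включая вложенные TLS-записи из Encrypted Application Data.
--     """
--     tls_records = []
--     current_record = []
--     record_start_markers = [
--         "TLSv1.2 Record Layer:",
--         "TLSv1.3 Record Layer:",
--         "Transport Layer Security"
--     ]
--     inside_encrypted_data = False
--
--     for line in lines:
--         line = line.strip()
--         if not line:
--             continue
--
--         # Проверяем, не начались ли вложенные TLS-записи в Encrypted Application Data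
--         if "Encrypted Application Data:" in line:
--             inside_encrypted_data = True
--         elif inside_encrypted_data and any(marker in line for marker in record_start_markers):
--             # Началась новая TLS запись внутри зашифрованных данных
--             if current_record:
--                 tls_records.append(current_record)
--                 current_record = []
--             inside_encrypted_data = False  # Сброс для следующих записей
--
--         # Если нашли начало TLS-записи, сохраняем предыдущую
--         if any(marker in line for marker in record_start_markers):
--             if current_record:
--                 tls_records.append(current_record)
--                 current_record = []
--         current_record.append(line)
--
--     if current_record:
--         tls_records.append(current_record)
--
--     return tls_records
-- ===== SOURCE B (Python) =====
-- def split_tls_records(lines):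
--     """Back-to-front rebuild: strip/drop blanks once, then walk the cleaned
--     lines in reverse, closing a group at each record-start marker."""
--     markers = ("TLSv1.2 Record Layer:", "TLSv1.3 Record Layer:",
--                "Transport Layer Security")
--     cleaned = [s for s in (l.strip() for l in lines) if s]
--     groups = []
--     acc = []
--     for line in reversed(cleaned):
--         acc.append(line)
--         if any(m in line for m in markers):
--             acc.reverse()
--             groups.append(acc)
--             acc = []
--     if acc:
--         acc.reverse()
--         groups.append(acc)
--     groups.reverse()
--     return groups
-- ===== Notes on version B (the rewrite author's own statement) =====
-- stated objective: simpler
-- what changed: Replaced A's forward stateful loop with its dead inside_encrypted_data flag and double flush by a strip/drop-blanks cleanup pass followed by a backwards walk over the cleaned lines that builds the record groups back-to-front, starting a fresh group at each marker line.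
import Mathlib
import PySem

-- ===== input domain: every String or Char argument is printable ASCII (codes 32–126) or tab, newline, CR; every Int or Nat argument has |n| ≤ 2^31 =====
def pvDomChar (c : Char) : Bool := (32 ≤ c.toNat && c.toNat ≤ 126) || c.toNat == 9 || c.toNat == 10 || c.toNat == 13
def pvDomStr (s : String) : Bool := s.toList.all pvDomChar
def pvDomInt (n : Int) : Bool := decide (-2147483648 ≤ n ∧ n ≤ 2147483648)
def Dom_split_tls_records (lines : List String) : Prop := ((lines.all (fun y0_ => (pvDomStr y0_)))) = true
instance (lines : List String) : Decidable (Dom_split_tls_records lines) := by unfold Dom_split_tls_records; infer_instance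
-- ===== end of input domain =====

-- B replaces A's stateful forward loop (with its dead encrypted-data flag) by a one-pass
-- strip/drop-blanks cleanup followed by a backwards walk that builds the groups back-to-front
-- (objective: simpler — no flag, no double flush).

-- the record-start markers (shared constant data of both programs)
def pvMarkers : List String :=
  ["TLSv1.2 Record Layer:", "TLSv1.3 Record Layer:", "Transport Layer Security"]

-- any(marker in line for marker in record_start_markers)
def pvIsM (line : String) : Bool := pvMarkers.any (fun m => PySem.Str.isIn m line)

-- ===== PORT A =====
-- loop body of A: state = (tls_records, current_record, inside_encrypted_data)
def pvStepA (st : List (List String) × List String × Bool) (l : String) :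
    List (List String) × List String × Bool :=
  let line := PySem.Str.strip l
  if line.toList.isEmpty then st
  else
    let t1 : List (List String) × List String × Bool :=
      if PySem.Str.isIn "Encrypted Application Data:" line then (st.1, st.2.1, true)
      else if st.2.2 && pvIsM line then
        ((if st.2.1.isEmpty then st.1 else st.1 ++ [st.2.1]), ([] : List String), false)
      else (st.1, st.2.1, st.2.2)
    let t2 : List (List String) × List String :=
      if pvIsM line then
        ((if t1.2.1.isEmpty then t1.1 else t1.1 ++ [t1.2.1]), ([] : List String))
      else (t1.1, t1.2.1)
    (t2.1, t2.2 ++ [line], t1.2.2)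

def split_tls_records (lines : List String) : List (List String) :=
  let st := lines.foldl pvStepA ([], [], false)
  if st.2.1.isEmpty then st.1 else st.1 ++ [st.2.1]

-- ===== PORT B =====
-- loop body of B: state = (groups, acc), lines visited in reverse
def pvStepB (p : List (List String) × List String) (line : String) :
    List (List String) × List String :=
  let acc := p.2 ++ [line]
  if pvIsM line then (p.1 ++ [acc.reverse], ([] : List String)) else (p.1, acc)

def split_tls_records_alt (lines : List String) : List (List String) :=
  let cleaned := (lines.map PySem.Str.strip).filter (fun s => !s.toList.isEmpty)
  let p := cleaned.reverse.foldl pvStepB ([], [])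
  let groups := if p.2.isEmpty then p.1 else p.1 ++ [p.2.reverse]
  groups.reverse

-- ===== PRECONDITION & SPEC =====
def Spec_split_tls_records (lines : List String) (out : List (List String)) : Prop := out = split_tls_records_alt lines
instance (lines : List String) (out : List (List String)) : Decidable (Spec_split_tls_records lines out) := by unfold Spec_split_tls_records; infer_instance

-- ===== CLAIM (what is proved, stated in full; the proofs are below) =====
def Claim_equal_split_tls_records : Prop := ∀ (lines : List String), Dom_split_tls_records lines → Spec_split_tls_records lines (split_tls_records lines)

-- ===== LEMMAS AND PROOFS =====

-- the cleaned line list both programs effectively work on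
def pvClean (lines : List String) : List String :=
  (lines.map PySem.Str.strip).filter (fun s => !s.toList.isEmpty)

-- common recursive characterisation of the grouping of a (cleaned) line list
def pvF : List String → List String → List (List String)
  | cur, [] => if cur.isEmpty then [] else [cur]
  | cur, c :: cs =>
      if pvIsM c then (if cur.isEmpty then pvF [c] cs else cur :: pvF [c] cs)
      else pvF (cur ++ [c]) cs

-- the flag A's step computes (it never influences records/current)
def pvFlagA (flag : Bool) (line : String) : Bool :=
  if PySem.Str.isIn "Encrypted Application Data:" line then true
  else if flag && pvIsM line then false else flag

lemma pvStepA_blank (st : List (List String) × List String × Bool) (l : String)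
    (he : (PySem.Str.strip l).toList.isEmpty = true) : pvStepA st l = st := by
  have he2 : PySem.Chars.strip l.toList = [] := by simpa using he
  simp [pvStepA, he2]

lemma pvStepA_marker (st : List (List String) × List String × Bool) (l : String)
    (he : (PySem.Str.strip l).toList.isEmpty = false)
    (hm : pvIsM (PySem.Str.strip l) = true) :
    pvStepA st l = ((if st.2.1.isEmpty then st.1 else st.1 ++ [st.2.1]),
      [PySem.Str.strip l], pvFlagA st.2.2 (PySem.Str.strip l)) := by
  simp only [pvStepA, pvFlagA, he, hm, Bool.false_eq_true, if_false, Bool.and_true]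
  split_ifs <;> simp_all

lemma pvStepA_nonmarker (st : List (List String) × List String × Bool) (l : String)
    (he : (PySem.Str.strip l).toList.isEmpty = false)
    (hm : pvIsM (PySem.Str.strip l) = false) :
    pvStepA st l = (st.1, st.2.1 ++ [PySem.Str.strip l], pvFlagA st.2.2 (PySem.Str.strip l)) := by
  simp only [pvStepA, pvFlagA, he, hm, Bool.false_eq_true, if_false, Bool.and_false]
  split_ifs <;> simp_all

lemma pvA_fold (ls : List String) : ∀ (recs : List (List String)) (cur : List String) (flag : Bool),
    (if (ls.foldl pvStepA (recs, cur, flag)).2.1.isEmpty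
      then (ls.foldl pvStepA (recs, cur, flag)).1
      else (ls.foldl pvStepA (recs, cur, flag)).1 ++ [(ls.foldl pvStepA (recs, cur, flag)).2.1])
      = recs ++ pvF cur (pvClean ls) := by
  induction ls with
  | nil => intro recs cur flag; cases cur <;> simp [pvF, pvClean]
  | cons l ls ih =>
    intro recs cur flag
    by_cases he : (PySem.Str.strip l).toList.isEmpty
    · have he2 : PySem.Chars.strip l.toList = [] := by simpa using he
      have hc : pvClean (l :: ls) = pvClean ls := by simp [pvClean, he2]
      rw [List.foldl_cons, pvStepA_blank _ _ he, hc]; exact ih recs cur flag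
    · have he' : (PySem.Str.strip l).toList.isEmpty = false := by simpa using he
      have he2 : ¬ PySem.Chars.strip l.toList = [] := by simpa using he
      have hc : pvClean (l :: ls) = PySem.Str.strip l :: pvClean ls := by
        simp [pvClean, he2]
      by_cases hm : pvIsM (PySem.Str.strip l)
      · rw [List.foldl_cons, pvStepA_marker _ _ he' hm, hc,
          ih _ [PySem.Str.strip l] (pvFlagA flag (PySem.Str.strip l))]
        cases cur <;> simp [pvF, hm]
      · have hm' : pvIsM (PySem.Str.strip l) = false := by simpa using hm
        rw [List.foldl_cons, pvStepA_nonmarker _ _ he' hm', hc,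
          ih recs (cur ++ [PySem.Str.strip l]) (pvFlagA flag (PySem.Str.strip l))]
        simp [pvF, hm']

lemma pvB_fold (cs : List String) : ∀ (cur : List String),
    (if ((cs.foldr (fun x y => pvStepB y x) ([], [])).2 ++ cur.reverse).isEmpty
      then (cs.foldr (fun x y => pvStepB y x) ([], [])).1
      else (cs.foldr (fun x y => pvStepB y x) ([], [])).1
            ++ [((cs.foldr (fun x y => pvStepB y x) ([], [])).2 ++ cur.reverse).reverse]).reverse
      = pvF cur cs := by
  induction cs with
  | nil => intro cur; cases cur <;> simp [pvF]
  | cons c cs ih =>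
    intro cur
    simp only [List.foldr_cons]
    by_cases hm : pvIsM c
    · simp only [pvStepB, hm, if_true]
      have h1 : ((cs.foldr (fun x y => pvStepB y x) ([], [])).1
            ++ [((cs.foldr (fun x y => pvStepB y x) ([], [])).2 ++ [c]).reverse]).reverse
          = pvF [c] cs := by
        simpa using ih [c]
      rw [show pvF cur (c :: cs)
            = if cur.isEmpty then pvF [c] cs else cur :: pvF [c] cs from by simp [pvF, hm],
          ← h1]
      cases cur <;> simp [pvStepB]
    · have hm' : pvIsM c = false := by simpa using hm
      simp only [pvStepB, hm', Bool.false_eq_true, if_false]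
      rw [show pvF cur (c :: cs) = pvF (cur ++ [c]) cs from by simp [pvF, hm']]
      have h1 := ih (cur ++ [c])
      simpa only [pvStepB, List.reverse_append, List.reverse_cons, List.reverse_nil,
        List.reverse_reverse, List.nil_append, List.append_assoc, List.singleton_append,
        List.cons_append] using h1

-- ===== VERDICT (by name: the statement is the Claim_ definition above) =====
theorem split_tls_records_spec : Claim_equal_split_tls_records := by
  intro lines _
  unfold Spec_split_tls_records split_tls_records split_tls_records_alt
  simp only [List.foldl_reverse]
  have hA := pvA_fold lines [] [] false
  have hB := pvB_fold ((lines.map PySem.Str.strip).filter (fun s => !s.toList.isEmpty)) []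
  simp only [List.nil_append, List.append_nil, List.reverse_nil, pvClean] at hA hB
  exact hA.trans hB.symm
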